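-- pv_equiv track=rewrite | github.com/edoardottt/programming-fundamentals | Workbook/Recursion/Recursion_15/program.py | es25
-- ===== SOURCE A (Python) =====
-- def es25(n):
--     """
--     Si definisca la funzione es25(n) che calcola la riga i-esima del triangolo di Tartaglia,
--     ovvero la lista dei coefficienti della potenza i-esima del binomio (a+b).
--
--     Si ricorda la definizione del triangolo di Tartaglia:
--             1
--            1 1
--           1 2 1
--          1 3 3 1
--         1 4 6 4 1
--        ...........
--     Tartaglia(0) = [1]   # caso base
--     I numeri che appaiono in ciascuna riga del triangolo di Tartaglia si ottengono
--     come somma di quelli sovrastanti nella riga precedente.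
--     Dove non troviamo una cifra consideriamo che si trovi un valore 0 (zero)
--     """
--     if n == 0:
--         return [1]
--     else:
--         ls = []
--         l = es25(n - 1)
--         for i in range(len(l) + 1):
--             if i == 0:
--                 ls.append(1)
--             elif i == len(l):
--                 ls.append(1)
--             elif 0 <= i - 1 <= len(l) - 1:
--                 ls.append(l[i] + l[i - 1])
--             else:
--                 ls.append(1)
--         return ls
-- ===== SOURCE B (Python) =====
-- def es25(n):
--     row = [1]
--     c = 1
--     for k in range(1, n + 1):
--         c = c * (n - k + 1) // k
--         row.append(c)
--     return row
-- ===== Notes on version B (the rewrite author's own statement) =====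
-- stated objective: faster
-- what changed: Replaces the recursive row-by-row construction of all n rows with a single-pass multiplicative binomial recurrence C(n,k)=C(n,k-1)*(n-k+1)//k.
import Mathlib
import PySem

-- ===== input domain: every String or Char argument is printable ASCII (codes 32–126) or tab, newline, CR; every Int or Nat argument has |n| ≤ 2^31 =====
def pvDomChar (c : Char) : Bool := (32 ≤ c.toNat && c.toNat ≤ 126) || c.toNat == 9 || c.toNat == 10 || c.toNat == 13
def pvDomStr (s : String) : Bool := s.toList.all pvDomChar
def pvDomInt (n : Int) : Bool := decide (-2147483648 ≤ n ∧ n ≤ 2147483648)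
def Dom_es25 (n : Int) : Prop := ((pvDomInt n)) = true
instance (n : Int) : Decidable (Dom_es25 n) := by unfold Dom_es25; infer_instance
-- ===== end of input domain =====

-- B replaces A's recursive build of all previous rows by a one-pass multiplicative
-- binomial recurrence (objective: faster).

-- ===== PORT A =====
-- the body of A's 'for i in range(len(l)+1)' loop, appending to ls
def es25Loop (l : List Int) : List Int :=
  (PySem.List.pyRange 0 (PySem.List.len l + 1) 1).foldl
    (fun ls i =>
      if i = 0 then ls ++ [1]
      else if i = PySem.List.len l then ls ++ [1]
      else if 0 ≤ i - 1 ∧ i - 1 ≤ PySem.List.len l - 1 then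
        ls ++ [PySem.List.pyGetD l i 0 + PySem.List.pyGetD l (i - 1) 0]
      else ls ++ [1]) []

def es25Nat : Nat → List Int
  | 0 => [1]
  | m + 1 => es25Loop (es25Nat m)

-- A recurses on n; on Pre_ (0 ≤ n) the recursion depth is n.toNat
def es25 (n : Int) : List Int := es25Nat n.toNat

-- ===== PORT B =====
def es25_alt (n : Int) : List Int :=
  ((PySem.List.pyRange 1 (n + 1) 1).foldl
    (fun (st : Int × List Int) k =>
      let c := PySem.Int.floordiv (st.1 * (n - k + 1)) k
      (c, st.2 ++ [c]))
    (1, [1])).2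

-- ===== PRECONDITION & SPEC =====
-- For negative arguments the Python A recurses without reaching a base case and raises RecursionError.
def Pre_es25 (n : Int) : Prop := 0 ≤ n
instance (n : Int) : Decidable (Pre_es25 n) := by unfold Pre_es25; infer_instance
def pvWitness_es25 : Int := (4)

def Spec_es25 (n : Int) (out : List Int) : Prop := out = es25_alt n
instance (n : Int) (out : List Int) : Decidable (Spec_es25 n out) := by unfold Spec_es25; infer_instance

-- ===== CLAIM (what is proved, stated in full; the proofs are below) =====
def Claim_equal_es25 : Prop := ∀ (n : Int), Dom_es25 n → Pre_es25 n → Spec_es25 n (es25 n)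

-- ===== LEMMAS AND PROOFS =====

-- the common specification: row m of Pascal's triangle
def rowSpec (m : Nat) : List Int :=
  (List.range (m + 1)).map (fun k => ((m.choose k : Nat) : Int))

theorem foldl_app {α β : Type} (f : α → β) :
    ∀ (xs : List α) (acc : List β),
      xs.foldl (fun ls i => ls ++ [f i]) acc = acc ++ xs.map f := by
  intro xs
  induction xs with
  | nil => simp
  | cons x xs ih => intro acc; simp [List.foldl, ih]

theorem es25Nat_eq : ∀ m, es25Nat m = rowSpec m := by
  intro m
  induction m with
  | zero => simp [es25Nat, rowSpec]
  | succ m ih =>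
    have hlen : (rowSpec m).length = m + 1 := by simp [rowSpec]
    show es25Loop (es25Nat m) = rowSpec (m + 1)
    rw [ih]
    unfold es25Loop
    have hbody : (fun (ls : List Int) (i : Int) =>
        if i = 0 then ls ++ [1]
        else if i = PySem.List.len (rowSpec m) then ls ++ [1]
        else if 0 ≤ i - 1 ∧ i - 1 ≤ PySem.List.len (rowSpec m) - 1 then
          ls ++ [PySem.List.pyGetD (rowSpec m) i 0 + PySem.List.pyGetD (rowSpec m) (i - 1) 0]
        else ls ++ [1])
      = (fun ls i => ls ++ [if i = 0 then 1
          else if i = PySem.List.len (rowSpec m) then 1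
          else if 0 ≤ i - 1 ∧ i - 1 ≤ PySem.List.len (rowSpec m) - 1 then
            PySem.List.pyGetD (rowSpec m) i 0 + PySem.List.pyGetD (rowSpec m) (i - 1) 0
          else 1]) := by
      funext ls i; split_ifs <;> rfl
    rw [hbody, foldl_app]
    rw [PySem.List.pyRange_one]
    simp only [PySem.List.len_eq, hlen, List.nil_append, sub_zero, List.map_map]
    rw [show (((m + 1 : Nat) : Int) + 1).toNat = m + 2 by omega]
    unfold rowSpec
    apply List.ext_getElem
    · simp
    · intro k h1 h2
      simp only [List.getElem_map, List.getElem_range, Function.comp]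
      have hk : k < m + 2 := by simpa using h1
      by_cases hk0 : k = 0
      · subst hk0; simp
      by_cases hkm : k = m + 1
      · subst hkm
        simp only [zero_add]
        rw [if_neg (by push_cast; omega)]
        rw [if_pos (by push_cast)]
        simp
      · -- middle case: 1 ≤ k ≤ m
        have h1k : 1 ≤ k := Nat.one_le_iff_ne_zero.mpr hk0
        have hkm' : k ≤ m := by omega
        rw [if_neg (by omega), if_neg (by omega), if_pos (by constructor <;> push_cast <;> omega)]
        have hget : ∀ j : Nat, j < m + 1 →
            PySem.List.pyGetD ((List.range (m + 1)).map (fun k => ((m.choose k : Nat) : Int))) (j : Int) 0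
              = ((m.choose j : Nat) : Int) := by
          intro j hj
          rw [PySem.List.pyGetD_of_nonneg _ _ (by positivity)]
          simp [List.getD, hj]
        rw [show ((0:Int) + (k:Int)) = ((k:Int)) by ring]
        rw [show ((k:Int) - 1) = (((k-1 : Nat) : Int)) by push_cast [h1k]; ring]
        rw [hget k (by omega), hget (k-1) (by omega)]
        rw [show k = (k - 1) + 1 by omega, Nat.choose_succ_succ]
        push_cast
        ring
  
theorem es25_alt_inv (n : Int) (N : Nat) (hn : n = (N : Int)) :
    ∀ j : Nat, j ≤ N →
      (PySem.List.pyRange 1 ((j : Int) + 1) 1).foldl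
        (fun (st : Int × List Int) k =>
          let c := PySem.Int.floordiv (st.1 * (n - k + 1)) k
          (c, st.2 ++ [c]))
        (1, [1])
      = (((N.choose j : Nat) : Int), (List.range (j + 1)).map (fun k => ((N.choose k : Nat) : Int))) := by
  intro j
  induction j with
  | zero =>
    intro _
    rw [PySem.List.pyRange_one_eq_nil (by norm_num)]
    simp
  | succ j ih =>
    intro hj
    have hj' : j ≤ N := by omega
    rw [show ((j + 1 : Nat) : Int) + 1 = ((j : Nat) : Int) + 1 + 1 by push_cast; ring]
    rw [PySem.List.pyRange_one_succ_right (by omega)]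
    rw [List.foldl_append, ih hj']
    simp only [List.foldl]
    have harg : n - ((j : Int) + 1) + 1 = (((N - j : Nat) : Int)) := by
      subst hn; push_cast [hj']; ring
    have hc : PySem.Int.floordiv (((N.choose j : Nat) : Int) * (n - ((j:Int) + 1) + 1)) ((j:Int) + 1)
        = ((N.choose (j+1) : Nat) : Int) := by
      rw [harg]
      rw [show ((j : Int) + 1) = (((j + 1 : Nat) : Int)) by push_cast; ring]
      rw [show ((N.choose j : Nat) : Int) * (((N - j : Nat) : Int)) = (((N.choose j * (N - j) : Nat)) : Int) by push_cast; ring]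
      rw [PySem.Int.floordiv_natCast]
      rw [← Nat.choose_succ_right_eq]
      rw [Nat.mul_div_cancel _ (by omega)]
    refine Prod.ext ?_ ?_
    · simpa using hc
    · simp only []
      rw [hc]
      simp [List.range_succ]
  
theorem es25_alt_eq (n : Int) (hn : 0 ≤ n) : es25_alt n = rowSpec n.toNat := by
  unfold es25_alt
  have h := es25_alt_inv n n.toNat (by omega) n.toNat (le_refl _)
  rw [show ((n.toNat : Nat) : Int) + 1 = n + 1 by omega] at h
  rw [h]
  rfl

-- ===== VERDICT (by name: the statement is the Claim_ definition above) =====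
theorem es25_spec : Claim_equal_es25 := by
  intro n _ hpre
  unfold Spec_es25 es25
  rw [es25Nat_eq, es25_alt_eq n hpre]
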